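-- pv_equiv track=rewrite | github.com/marmotton/adventofcode | 2022/day08/day08.py | detect_visible_trees
-- ===== SOURCE A (Python) =====
-- def detect_visible_trees(line):
--     visible_trees = [0] * len(line)
--
--     tallest_tree = -1
--
--     for idx, size in enumerate(line):
--         if size > tallest_tree:
--             visible_trees[idx] = 1
--             tallest_tree = size
--
--     return visible_trees
-- ===== SOURCE B (Python) =====
-- def detect_visible_trees(line):
--     # Brute force: a tree is visible iff it is strictly taller than every
--     # earlier tree and taller than the -1 baseline, i.e. than the maximum
--     # of -1 and its whole prefix, recomputed from scratch for each index.
--     return [1 if size > max([-1, *line[:i]]) else 0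
--             for i, size in enumerate(line)]
-- ===== Notes on version B (the rewrite author's own statement) =====
-- stated objective: alternative
-- what changed: B drops A's stateful single pass (running maximum + in-place marking of a preallocated array) and instead decides each index independently by recomputing max([-1, *line[:i]]) from scratch and comparing, trading A's O(n) loop for a stateless quadratic comprehension.
import Mathlib
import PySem

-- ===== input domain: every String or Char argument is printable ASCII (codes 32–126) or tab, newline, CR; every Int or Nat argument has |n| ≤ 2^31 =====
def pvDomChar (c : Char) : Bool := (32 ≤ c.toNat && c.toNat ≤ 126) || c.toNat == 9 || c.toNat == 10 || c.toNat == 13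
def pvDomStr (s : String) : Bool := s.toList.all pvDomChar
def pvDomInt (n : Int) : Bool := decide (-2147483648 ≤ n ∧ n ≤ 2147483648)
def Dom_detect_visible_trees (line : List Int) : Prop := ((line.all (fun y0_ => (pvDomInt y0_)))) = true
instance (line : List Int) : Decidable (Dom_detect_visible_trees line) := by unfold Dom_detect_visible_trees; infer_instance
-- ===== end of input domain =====

-- B replaces A's single stateful loop (running maximum, in-place marking of a
-- preallocated array) by a stateless quadratic brute force: for each index it
-- recomputes max([-1, *prefix]) from scratch and compares (objective: alternative).

-- ===== PORT A =====
-- enumerate(line) starting at index i (A uses enumerate, i.e. i = 0)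
def pvEnumFrom (i : Nat) : List Int → List (Nat × Int)
  | [] => []
  | x :: xs => (i, x) :: pvEnumFrom (i + 1) xs

-- the 'for idx, size in enumerate(line)' loop: state = (visible_trees, tallest_tree)
def pvALoop : List (Nat × Int) → List Int → Int → List Int
  | [], vis, _ => vis
  | (idx, size) :: rest, vis, tallest =>
    if size > tallest then pvALoop rest (vis.set idx 1) size
    else pvALoop rest vis tallest

def detect_visible_trees (line : List Int) : List Int :=
  pvALoop (pvEnumFrom 0 line) (List.replicate line.length 0) (-1)

-- ===== PORT B =====
-- max([-1, *line[:i]]) = (line.take i).foldl max (-1); line[:i] with 0 ≤ i is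
-- exactly List.take i, and Python's max of a nonempty int list is this foldl.
def detect_visible_trees_alt (line : List Int) : List Int :=
  (pvEnumFrom 0 line).map
    (fun p => if p.2 > ((line.take p.1).foldl max (-1)) then (1 : Int) else 0)

-- ===== PRECONDITION & SPEC =====
def Spec_detect_visible_trees (line : List Int) (out : List Int) : Prop := out = detect_visible_trees_alt line
instance (line : List Int) (out : List Int) : Decidable (Spec_detect_visible_trees line out) := by unfold Spec_detect_visible_trees; infer_instance

-- ===== CLAIM (what is proved, stated in full; the proofs are below) =====
def Claim_equal_detect_visible_trees : Prop := ∀ (line : List Int), Dom_detect_visible_trees line → Spec_detect_visible_trees line (detect_visible_trees line)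

-- ===== LEMMAS AND PROOFS =====

-- common reference value: visibility of the suffix given the prefix maximum t
def pvBBody (rest : List Int) (t : Int) : List Int :=
  match rest with
  | [] => []
  | s :: rest => (if s > t then (1 : Int) else 0) :: pvBBody rest (max t s)

theorem pvSet_append_replicate (pre : List Int) (n : Nat) :
    (pre ++ (0 : Int) :: List.replicate n 0).set pre.length 1
      = (pre ++ [1]) ++ List.replicate n 0 := by
  rw [List.set_append_right _ _ (le_refl _)]
  simp

-- A's loop invariant: already-processed prefix is pre, the suffix is fresh zeros
theorem pvALoop_eq (rest : List Int) : ∀ (pre : List Int) (t : Int),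
    pvALoop (pvEnumFrom pre.length rest) (pre ++ List.replicate rest.length 0) t
      = pre ++ pvBBody rest t := by
  induction rest with
  | nil => intro pre t; simp [pvEnumFrom, pvALoop, pvBBody]
  | cons s rest ih =>
    intro pre t
    simp only [pvEnumFrom, pvALoop, pvBBody, List.length_cons, List.replicate]
    by_cases h : s > t
    · have hm : max t s = s := by omega
      rw [if_pos h, pvSet_append_replicate]
      have := ih (pre ++ [1]) s
      simp only [List.length_append, List.length_cons, List.length_nil] at this
      rw [this, hm]
      simp [if_pos h]
    · have hm : max t s = t := by omega
      rw [if_neg h]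
      have := ih (pre ++ [0]) t
      simp only [List.length_append, List.length_cons, List.length_nil] at this
      have hz : pre ++ (0 : Int) :: List.replicate rest.length 0
          = (pre ++ [0]) ++ List.replicate rest.length 0 := by simp
      rw [hz, this, hm]
      simp [if_neg h]

-- B's mapped comparison against the recomputed prefix maximum equals pvBBody
theorem pvB_eq (line : List Int) : ∀ (rest front : List Int), front ++ rest = line →
    (pvEnumFrom front.length rest).map
        (fun p => if p.2 > ((line.take p.1).foldl max (-1)) then (1 : Int) else 0)
      = pvBBody rest (front.foldl max (-1)) := by
  intro rest
  induction rest with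
  | nil => intro front _; simp [pvEnumFrom, pvBBody]
  | cons s rest ih =>
    intro front hfr
    have htake : line.take front.length = front := by
      rw [← hfr]; exact List.take_left ..
    simp only [pvEnumFrom, List.map, pvBBody, htake]
    congr 1
    have hfr' : (front ++ [s]) ++ rest = line := by simpa using hfr
    have := ih (front ++ [s]) hfr'
    simp only [List.length_append, List.length_cons, List.length_nil,
      List.foldl_append, List.foldl] at this
    simpa using this

-- ===== VERDICT (by name: the statement is the Claim_ definition above) =====
theorem detect_visible_trees_spec : Claim_equal_detect_visible_trees := by
  intro line _
  show detect_visible_trees line = detect_visible_trees_alt line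
  have hA := pvALoop_eq line [] (-1)
  have hB := pvB_eq line line [] rfl
  simp only [List.length_nil, List.nil_append, List.foldl_nil] at hA hB
  rw [detect_visible_trees, detect_visible_trees_alt, hA, hB]
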